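-- pv_equiv track=rewrite | github.com/richard-paredes/CS-Fundamentals | Algorithms/A14/MagicSquare.py | validCol
-- ===== SOURCE A (Python) =====
-- dimension = 4
--
-- magicNum = int(dimension * ((dimension * dimension) + 1) / 2)
--
-- def getSubsets(lst, subset, idx, size, allSubsets):
-- 	if (idx == len(lst)):
-- 		if (len(subset) == size):
-- 			allSubsets.append(subset)
-- 		return
-- 	elif len(subset) > size:
-- 		return
-- 	else:
-- 		temp = subset[:]
-- 		subset.append(lst[idx])
-- 		getSubsets(lst, subset, idx + 1, size, allSubsets)
-- 		getSubsets(lst, temp, idx + 1, size, allSubsets)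
--
-- def validCol(lst, remainingNums):
--
-- 	if len(lst) % dimension == 0:
-- 		rowIdx = len(lst) // dimension
-- 	else:
-- 		rowIdx = (len(lst) // dimension) + 1
--
--
-- 	colTotal = getColTotal(lst)
--
-- 	allNumSubsets = []
-- 	numSets = []
-- 	getSubsets(remainingNums, numSets, 0, dimension - rowIdx, allNumSubsets)
--
-- 	for subset in allNumSubsets:
-- 		setSum = sum(subset)
-- 		if colTotal + setSum == magicNum:
-- 			return True
-- 	return False
--
-- def getColTotal(lst):
--
-- 	total = 0
-- 	colIdx = (len(lst) % dimension) - 1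
-- 	for i in range(len(lst)):
-- 		if (i - colIdx) % dimension == 0:
-- 			total += lst[i]
--
-- 	return total
-- ===== SOURCE B (Python) =====
-- dimension = 4
--
-- magicNum = (dimension * ((dimension * dimension) + 1)) // 2
--
-- def validCol(lst, remainingNums):
--     n = len(lst)
--     # size of the completing subset = dimension - ceil(n / dimension)
--     k = dimension - (n + dimension - 1) // dimension
--     # entries of lst in the current column
--     colTotal = sum(x for i, x in enumerate(lst) if i % dimension == (n - 1) % dimension)
--     # bounded-cardinality subset-sum DP: dp holds every (count, sum) reachable
--     # by a subset of the numbers seen so far, with count capped at k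
--     dp = {(0, 0)}
--     for x in remainingNums:
--         dp = dp | {(c + 1, s + x) for (c, s) in dp if c < k}
--     return (k, magicNum - colTotal) in dp
-- ===== Notes on version B (the rewrite author's own statement) =====
-- stated objective: alternative
-- what changed: A enumerates all size-k subsets of remainingNums by exponential recursion and scans them for a matching sum; B runs a bounded-cardinality subset-sum DP keeping the set of reachable (count, sum) pairs with count capped at k, and checks one membership at the end.
import Mathlib
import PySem

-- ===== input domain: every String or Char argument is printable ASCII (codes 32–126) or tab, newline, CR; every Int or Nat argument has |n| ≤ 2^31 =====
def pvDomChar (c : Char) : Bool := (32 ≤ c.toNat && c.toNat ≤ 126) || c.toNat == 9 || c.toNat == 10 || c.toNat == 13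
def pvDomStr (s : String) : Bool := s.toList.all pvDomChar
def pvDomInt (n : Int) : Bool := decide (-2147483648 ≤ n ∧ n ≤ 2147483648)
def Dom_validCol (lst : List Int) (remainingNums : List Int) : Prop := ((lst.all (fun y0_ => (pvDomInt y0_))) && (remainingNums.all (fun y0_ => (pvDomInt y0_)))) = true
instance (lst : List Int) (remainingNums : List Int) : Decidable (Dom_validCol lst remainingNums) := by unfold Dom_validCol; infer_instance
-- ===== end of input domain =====

-- B replaces A's exponential enumeration of all size-k subsets by a (count, sum) subset-sum DP with the subset size capped at k; objective: alternative algorithm.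

-- ===== PORT A =====

-- module constants: dimension = 4; magicNum = int(4*((4*4)+1)/2) — Python computes it
-- via float true-division; the value is exactly 34, used as the literal here.
def pvDimension : Int := 4
def pvMagicNum : Int := 34

def pvGetColTotal (lst : List Int) : Int :=
  let colIdx : Int := PySem.Int.mod (lst.length : Int) pvDimension - 1
  (PySem.List.pyRange 0 (lst.length : Int) 1).foldl
    (fun total i =>
      if PySem.Int.mod (i - colIdx) pvDimension == 0 then total + PySem.List.pyGetD lst i 0
      else total) 0

-- Python's getSubsets: 'subset' mutation is threaded functionally; allSubsets is the
-- accumulator and the result. idx stays in 0..len(lst) at every call from validCol, so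
-- the guard 'lst.length ≤ idx' (needed for termination) coincides with 'idx == len(lst)'.
def pvGetSubsets (lst : List Int) (subset : List Int) (idx : Nat) (size : Int)
    (allSubsets : List (List Int)) : List (List Int) :=
  if lst.length ≤ idx then
    if (subset.length : Int) = size then allSubsets ++ [subset] else allSubsets
  else if (subset.length : Int) > size then allSubsets
  else
    let a1 := pvGetSubsets lst (subset ++ [PySem.List.pyGetD lst (idx : Int) 0]) (idx + 1) size allSubsets
    pvGetSubsets lst subset (idx + 1) size a1
termination_by lst.length - idx

def validCol (lst : List Int) (remainingNums : List Int) : Bool :=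
  let rowIdx : Int :=
    if PySem.Int.mod (lst.length : Int) pvDimension == 0 then
      PySem.Int.floordiv (lst.length : Int) pvDimension
    else
      PySem.Int.floordiv (lst.length : Int) pvDimension + 1
  let colTotal := pvGetColTotal lst
  let allNumSubsets := pvGetSubsets remainingNums [] 0 (pvDimension - rowIdx) []
  -- 'for subset in allNumSubsets: if colTotal + sum(subset) == magicNum: return True' / 'return False'
  allNumSubsets.any (fun subset => colTotal + subset.sum == pvMagicNum)

-- ===== PORT B =====

-- one DP step: dp | {(c+1, s+x) for (c, s) in dp if c < k}
def pvStep (k : Int) (dp : PySem.Set (Int × Int)) (x : Int) : PySem.Set (Int × Int) :=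
  PySem.Set.union dp
    (PySem.Set.ofList ((dp.filter (fun cs => decide (cs.1 < k))).map (fun cs => (cs.1 + 1, cs.2 + x))))

def validCol_alt (lst : List Int) (remainingNums : List Int) : Bool :=
  let n : Int := (lst.length : Int)
  let k : Int := 4 - PySem.Int.floordiv (n + 4 - 1) 4
  let colTotal : Int :=
    ((PySem.List.enumerate lst).filter
      (fun p => PySem.Int.mod p.1 4 == PySem.Int.mod (n - 1) 4)).foldl (fun a p => a + p.2) 0
  let dp := remainingNums.foldl (pvStep k) (PySem.Set.ofList [((0 : Int), (0 : Int))])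
  PySem.Set.contains dp (k, 34 - colTotal)

-- ===== PRECONDITION & SPEC =====
def Spec_validCol (lst : List Int) (remainingNums : List Int) (out : Bool) : Prop := out = validCol_alt lst remainingNums
instance (lst : List Int) (remainingNums : List Int) (out : Bool) : Decidable (Spec_validCol lst remainingNums out) := by unfold Spec_validCol; infer_instance

-- ===== CLAIM (what is proved, stated in full; the proofs are below) =====
def Claim_equal_validCol : Prop := ∀ (lst : List Int) (remainingNums : List Int), Dom_validCol lst remainingNums → Spec_validCol lst remainingNums (validCol lst remainingNums)

-- ===== LEMMAS AND PROOFS =====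

-- membership characterisation of A's subset enumeration
theorem mem_pvGetSubsets (lst : List Int) (subset : List Int) (idx : Nat) (size : Int)
    (allSubsets : List (List Int)) (l : List Int) (hidx : idx ≤ lst.length) :
    l ∈ pvGetSubsets lst subset idx size allSubsets ↔
      l ∈ allSubsets ∨
        ∃ t, t.Sublist (lst.drop idx) ∧ (subset.length : Int) + t.length = size ∧ l = subset ++ t := by
  fun_induction pvGetSubsets lst subset idx size allSubsets with
  | case1 subset idx allSubsets hle heq =>
    have hidx' : idx = lst.length := le_antisymm hidx hle
    subst hidx'
    simp [List.drop_length, List.sublist_nil, heq]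
  | case2 subset idx allSubsets hle hne =>
    have hidx' : idx = lst.length := le_antisymm hidx hle
    subst hidx'
    simp only [List.drop_length, List.sublist_nil]
    constructor
    · exact Or.inl
    · rintro (h | ⟨t, rfl, hlen, rfl⟩)
      · exact h
      · simp at hlen; exact absurd hlen hne
  | case3 subset idx allSubsets hlt hbig =>
    constructor
    · exact Or.inl
    · rintro (h | ⟨t, _, hlen, rfl⟩)
      · exact h
      · exfalso; have : (0 : Int) ≤ t.length := by positivity
        omega
  | case4 subset idx allSubsets hlt hbig a1 ih1 ih2 =>
    have hlt' : idx < lst.length := by omega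
    have hdrop : lst.drop idx = lst[idx] :: lst.drop (idx + 1) := List.drop_eq_getElem_cons hlt'
    have hget : PySem.List.pyGetD lst (idx : Int) 0 = lst[idx] := by
      rw [PySem.List.pyGetD_natCast, List.getD_eq_getElem lst 0 hlt']
    rw [ih2 (by omega), ih1 (by omega), hget, hdrop]
    constructor
    · rintro ((h | ⟨t, ht, hlen, rfl⟩) | ⟨t, ht, hlen, rfl⟩)
      · exact Or.inl h
      · refine Or.inr ⟨lst[idx] :: t, ?_, ?_, by simp⟩
        · exact List.sublist_cons_iff.mpr (Or.inr ⟨t, rfl, ht⟩)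
        · push_cast [List.length_append, List.length_cons, List.length_nil] at hlen ⊢; omega
      · exact Or.inr ⟨t, List.sublist_cons_iff.mpr (Or.inl ht), hlen, rfl⟩
    · rintro (h | ⟨t, ht, hlen, rfl⟩)
      · exact Or.inl (Or.inl h)
      · rcases List.sublist_cons_iff.mp ht with ht' | ⟨r, rfl, hr⟩
        · exact Or.inr ⟨t, ht', hlen, rfl⟩
        · refine Or.inl (Or.inr ⟨r, hr, ?_, by simp⟩)
          push_cast [List.length_append, List.length_cons, List.length_nil] at hlen ⊢; omega

-- A = true iff some sublist of remainingNums of length (4 - rowIdx) completes the column sum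
theorem validCol_iff (lst : List Int) (remainingNums : List Int) :
    validCol lst remainingNums = true ↔
      ∃ t : List Int, t.Sublist remainingNums ∧
        (t.length : Int) = pvDimension -
          (if PySem.Int.mod (lst.length : Int) pvDimension == 0 then
            PySem.Int.floordiv (lst.length : Int) pvDimension
          else PySem.Int.floordiv (lst.length : Int) pvDimension + 1) ∧
        pvGetColTotal lst + t.sum = 34 := by
  unfold validCol
  simp only [List.any_eq_true, beq_iff_eq]
  constructor
  · rintro ⟨l, hl, hsum⟩
    rcases (mem_pvGetSubsets remainingNums [] 0 _ [] l (Nat.zero_le _)).mp hl with h | h2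
    · simp at h
    · obtain ⟨t, ht, hlen, heq⟩ := h2
      rw [List.nil_append] at heq
      exact ⟨t, by simpa using ht, by simpa using hlen, heq ▸ hsum⟩
  · rintro ⟨t, ht, hlen, hsum⟩
    exact ⟨t, (mem_pvGetSubsets remainingNums [] 0 _ [] t (Nat.zero_le _)).mpr
      (Or.inr ⟨t, by simpa using ht, by simpa using hlen, by simp⟩), by simpa using hsum⟩

-- DP invariant for B
def pvInv (k : Int) (p : List Int) (dp : PySem.Set (Int × Int)) : Prop :=
  ∀ c s : Int, (c, s) ∈ dp ↔ ∃ t : List Int, t.Sublist p ∧ (t.length : Int) = c ∧ t.sum = s ∧ (c = 0 ∨ c ≤ k)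

theorem pvInv_step (k : Int) (p : List Int) (dp : PySem.Set (Int × Int)) (x : Int)
    (h : pvInv k p dp) : pvInv k (p ++ [x]) (pvStep k dp x) := by
  intro c s
  unfold pvStep
  rw [PySem.Set.mem_union, PySem.Set.mem_ofList, List.mem_map]
  constructor
  · rintro (hmem | ⟨⟨c', s'⟩, hcs, heq⟩)
    · rcases (h c s).mp hmem with ⟨t, ht, h1, h2, h3⟩
      exact ⟨t, ht.trans (List.sublist_append_left p [x]), h1, h2, h3⟩
    · rw [List.mem_filter, decide_eq_true_eq] at hcs
      obtain ⟨hcs, hlt⟩ := hcs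
      obtain ⟨rfl, rfl⟩ : c' + 1 = c ∧ s' + x = s := by
        simpa [Prod.ext_iff] using heq
      rcases (h c' s').mp hcs with ⟨t, ht, h1, h2, h3⟩
      refine ⟨t ++ [x], ht.append (List.Sublist.refl [x]), ?_, by simp [h2], Or.inr (by omega)⟩
      push_cast [List.length_append, List.length_cons, List.length_nil]
      omega
  · rintro ⟨t, ht, h1, h2, h3⟩
    rcases List.sublist_append_iff.mp ht with ⟨t1, t2, rfl, ht1, ht2⟩
    rcases List.sublist_singleton.mp ht2 with rfl | rfl
    · rw [List.append_nil] at *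
      exact Or.inl ((h c s).mpr ⟨t1, ht1, h1, h2, h3⟩)
    · have hlen1 : (t1.length : Int) = c - 1 := by
        push_cast [List.length_append, List.length_cons, List.length_nil] at h1
        omega
      have hck : c ≤ k := by
        rcases h3 with h3 | h3
        · exfalso
          push_cast [List.length_append, List.length_cons, List.length_nil] at h1
          omega
        · exact h3
      have hsum1 : t1.sum = s - x := by
        simp [List.sum_append] at h2
        omega
      refine Or.inr ⟨(c - 1, s - x), ?_, by simp⟩
      rw [List.mem_filter, decide_eq_true_eq]
      exact ⟨(h (c - 1) (s - x)).mpr ⟨t1, ht1, hlen1, hsum1, by omega⟩, by omega⟩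

theorem pvInv_foldl (k : Int) (nums p : List Int) (dp : PySem.Set (Int × Int))
    (h : pvInv k p dp) : pvInv k (p ++ nums) (nums.foldl (pvStep k) dp) := by
  induction nums generalizing p dp with
  | nil => simpa using h
  | cons x xs ih =>
    simp only [List.foldl_cons]
    have := ih (p ++ [x]) (pvStep k dp x) (pvInv_step k p dp x h)
    simpa [List.append_assoc] using this

theorem validCol_alt_iff (lst : List Int) (remainingNums : List Int) :
    validCol_alt lst remainingNums = true ↔
      ∃ t : List Int, t.Sublist remainingNums ∧
        (t.length : Int) = 4 - PySem.Int.floordiv ((lst.length : Int) + 4 - 1) 4 ∧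
        t.sum = 34 - (((PySem.List.enumerate lst).filter
          (fun p => PySem.Int.mod p.1 4 == PySem.Int.mod ((lst.length : Int) - 1) 4)).foldl
            (fun a p => a + p.2) 0) := by
  unfold validCol_alt
  have hinit : pvInv (4 - PySem.Int.floordiv ((lst.length : Int) + 4 - 1) 4) []
      (PySem.Set.ofList [((0 : Int), (0 : Int))]) := by
    intro c s
    constructor
    · intro hmem
      have : (c, s) = ((0 : Int), (0 : Int)) := by
        simpa using (PySem.Set.mem_ofList [((0 : Int), (0 : Int))] (c, s)).mp hmem
      obtain ⟨rfl, rfl⟩ : c = 0 ∧ s = 0 := by simpa [Prod.ext_iff] using this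
      exact ⟨[], List.Sublist.refl [], by simp, by simp, Or.inl rfl⟩
    · rintro ⟨t, ht, h1, h2, _⟩
      have : t = [] := List.sublist_nil.mp ht
      subst this
      simp at h1 h2
      subst h1; subst h2
      exact (PySem.Set.mem_ofList _ _).mpr (by simp)
  have hinv := pvInv_foldl (4 - PySem.Int.floordiv ((lst.length : Int) + 4 - 1) 4)
    remainingNums [] _ hinit
  rw [List.nil_append] at hinv
  rw [PySem.Set.contains_iff, hinv]
  constructor
  · rintro ⟨t, ht, h1, h2, _⟩
    exact ⟨t, ht, h1, h2⟩
  · rintro ⟨t, ht, h1, h2⟩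
    exact ⟨t, ht, h1, h2, Or.inr (le_refl _)⟩

-- the two 'size of the completing subset' computations agree
theorem size_eq (n : Nat) :
    pvDimension - (if PySem.Int.mod (n : Int) pvDimension == 0 then
        PySem.Int.floordiv (n : Int) pvDimension
      else PySem.Int.floordiv (n : Int) pvDimension + 1)
      = 4 - PySem.Int.floordiv ((n : Int) + 4 - 1) 4 := by
  have h4 : (0 : Int) < 4 := by norm_num
  simp only [pvDimension, PySem.Int.mod_eq_emod_of_pos h4, PySem.Int.floordiv_eq_ediv_of_pos h4,
    beq_iff_eq]
  split_ifs with h <;> omega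

-- the two column-total computations agree
theorem colTotal_eq (lst : List Int) :
    pvGetColTotal lst =
      ((PySem.List.enumerate lst).filter
        (fun p => PySem.Int.mod p.1 4 == PySem.Int.mod ((lst.length : Int) - 1) 4)).foldl
          (fun a p => a + p.2) 0 := by
  have h4 : (0 : Int) < 4 := by norm_num
  have henum : PySem.List.enumerate lst
      = (PySem.List.pyRange 0 (lst.length : Int) 1).map (fun j => (j, PySem.List.pyGetD lst j 0)) := by
    simpa [PySem.List.len] using PySem.List.enumerate_eq_map_pyRange lst (0 : Int)
  rw [pvGetColTotal, henum, List.filter_map, List.foldl_map, List.foldl_filter]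
  have hfun : (fun (total : Int) (i : Int) =>
        if PySem.Int.mod (i - (PySem.Int.mod (lst.length : Int) pvDimension - 1)) pvDimension == 0
        then total + PySem.List.pyGetD lst i 0 else total)
      = (fun (a : Int) (i : Int) =>
        if PySem.Int.mod i 4 == PySem.Int.mod ((lst.length : Int) - 1) 4
        then a + PySem.List.pyGetD lst i 0 else a) := by
    funext a i
    have hcond : (PySem.Int.mod (i - (PySem.Int.mod (lst.length : Int) pvDimension - 1)) pvDimension == 0)
        = (PySem.Int.mod i 4 == PySem.Int.mod ((lst.length : Int) - 1) 4) := by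
      simp only [pvDimension, PySem.Int.mod_eq_emod_of_pos h4]
      rw [Bool.eq_iff_iff]
      simp only [beq_iff_eq]
      omega
    rw [hcond]
  rw [hfun]
  simp [Function.comp]

-- ===== VERDICT (by name: the statement is the Claim_ definition above) =====
theorem validCol_spec : Claim_equal_validCol := by
  intro lst remainingNums _
  unfold Spec_validCol
  rw [Bool.eq_iff_iff, validCol_iff, validCol_alt_iff]
  constructor
  · rintro ⟨t, ht, hlen, hsum⟩
    exact ⟨t, ht, by rw [← size_eq]; exact hlen, by rw [← colTotal_eq]; omega⟩
  · rintro ⟨t, ht, hlen, hsum⟩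
    exact ⟨t, ht, by rw [size_eq]; exact hlen, by rw [colTotal_eq] at *; omega⟩
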